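-- pv_equiv track=rewrite | github.com/SurajPatil314/Leetcode2 | rearrange_barcodes_maths.py | rearrangeBarcodes
-- ===== SOURCE A (Python) =====
-- from typing import List
--
-- def rearrangeBarcodes(barcodes: List[int]) -> List[int]:
--     if len(barcodes) < 2:
--         return barcodes
--     n = len(barcodes)
--     ans = [0] * len(barcodes)
--     q = {}
--     for i in barcodes:
--         if i in q:
--             q[i] = q.get(i) + 1
--         else:
--             q[i] = 1
--
--     q = dict(sorted(q.items(), key=lambda x: x[1], reverse=True))
--     i1 = 0
--     for i, j in q.items():
--         for _ in range(j):
--             ans[i1] = i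
--             i1 = i1 + 2
--             if i1 >= n:
--                 i1 = 1
--
--     return ans
-- ===== SOURCE B (Python) =====
-- from typing import List
--
-- def rearrangeBarcodes(barcodes: List[int]) -> List[int]:
--     # Bucket-sort the distinct values by frequency instead of a comparison
--     # sort, then interleave the value stream over even/odd slots.
--     n = len(barcodes)
--     if n < 2:
--         return barcodes
--     counts = {}
--     for x in barcodes:
--         counts[x] = counts.get(x, 0) + 1
--     buckets = {}
--     for x, c in counts.items():
--         buckets.setdefault(c, []).append(x)
--     flat = []
--     for c in range(n, 0, -1):
--         for x in buckets.get(c, []):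
--             flat += [x] * c
--     half = (n + 1) // 2
--     out = []
--     for a, b in zip(flat[:half], flat[half:]):
--         out.append(a)
--         out.append(b)
--     if n % 2:
--         out.append(flat[half - 1])
--     return out
-- ===== Notes on version B (the rewrite author's own statement) =====
-- stated objective: alternative
-- what changed: B replaces A's comparison sort of the (value,count) pairs by a bucket pass over the counts (dict of buckets indexed by frequency, swept from n down to 1) and builds the answer by zip-interleaving the value stream over even/odd slots instead of A's jumping write index into a preallocated array; intended as the O(n) counting-sort variant, measured only ~1.25x at the largest size.
import Mathlib
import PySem

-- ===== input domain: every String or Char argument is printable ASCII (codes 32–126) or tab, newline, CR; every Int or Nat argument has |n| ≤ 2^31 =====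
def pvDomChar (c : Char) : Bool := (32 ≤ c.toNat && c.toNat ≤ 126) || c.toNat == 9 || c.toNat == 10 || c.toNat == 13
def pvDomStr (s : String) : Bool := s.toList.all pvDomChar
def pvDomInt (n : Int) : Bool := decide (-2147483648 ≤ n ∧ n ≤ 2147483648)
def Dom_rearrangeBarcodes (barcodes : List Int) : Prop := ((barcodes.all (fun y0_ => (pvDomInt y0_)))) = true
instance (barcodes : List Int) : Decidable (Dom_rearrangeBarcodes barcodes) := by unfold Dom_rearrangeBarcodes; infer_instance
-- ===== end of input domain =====

-- B replaces A's comparison sort of the counts by a frequency bucket pass and fills the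
-- even/odd slots by zip-interleaving the value stream instead of A's jumping write index
-- (objective: alternative algorithm; timing showed no >=1.5x speed-up).

-- ===== PORT A =====
def rearrangeBarcodes (barcodes : List Int) : List Int :=
  if barcodes.length < 2 then barcodes else
    let n : Int := (barcodes.length : Int)
    let ans : List Int := List.replicate barcodes.length 0
    let q : PySem.Dict Int Int :=
      barcodes.foldl
        (fun d i => if d.contains i then d.insert i (d.getD i 0 + 1) else d.insert i 1)
        PySem.Dict.empty
    -- q = dict(sorted(q.items(), key=lambda x: x[1], reverse=True)): rebuild a dict
    -- from the sorted items (insertion order = the sorted order)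
    let q2 : PySem.Dict Int Int :=
      (PySem.List.sorted q.items (fun p => p.2) true).foldl
        (fun d p => d.insert p.1 p.2) PySem.Dict.empty
    -- ans[i1] = i: i1 stays inside [0, n) here (the wrap resets it to 1), so List.set
    -- at i1.toNat is exactly Python's in-range item assignment
    let st := q2.items.foldl
      (fun (st : List Int × Int) p =>
        (PySem.List.pyRange 0 p.2 1).foldl
          (fun (st : List Int × Int) _ =>
            let a := st.1.set st.2.toNat p.1
            let i1 := st.2 + 2
            (a, if n ≤ i1 then 1 else i1)) st)
      (ans, 0)
    st.1

-- ===== PORT B =====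
def rearrangeBarcodes_alt (barcodes : List Int) : List Int :=
  if barcodes.length < 2 then barcodes else
    let n : Int := (barcodes.length : Int)
    let counts : PySem.Dict Int Int :=
      barcodes.foldl (fun d x => d.insert x (d.getD x 0 + 1)) PySem.Dict.empty
    let buckets : PySem.Dict Int (List Int) :=
      counts.items.foldl (fun d p => d.modify p.2 [] (fun l => l ++ [p.1])) PySem.Dict.empty
    let flat : List Int :=
      (PySem.List.pyRange n 0 (-1)).foldl
        (fun acc c =>
          (buckets.getD c []).foldl (fun acc x => acc ++ PySem.List.pyRepeat [x] c) acc)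
        []
    let half : Int := PySem.Int.floordiv (n + 1) 2
    let evens := PySem.List.slice flat none (some half)
    let odds := PySem.List.slice flat (some half) none
    let out := (evens.zip odds).foldl (fun acc p => (acc ++ [p.1]) ++ [p.2]) []
    -- flat[half-1] is in range here, so pyGetD is Python's flat[half - 1]
    if PySem.Int.mod n 2 ≠ 0 then out ++ [PySem.List.pyGetD flat (half - 1) 0] else out

-- ===== PRECONDITION & SPEC =====
def Spec_rearrangeBarcodes (barcodes : List Int) (out : List Int) : Prop := out = rearrangeBarcodes_alt barcodes
instance (barcodes : List Int) (out : List Int) : Decidable (Spec_rearrangeBarcodes barcodes out) := by unfold Spec_rearrangeBarcodes; infer_instance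

-- ===== CLAIM (what is proved, stated in full; the proofs are below) =====
def Claim_equal_rearrangeBarcodes : Prop := ∀ (barcodes : List Int), Dom_rearrangeBarcodes barcodes → Spec_rearrangeBarcodes barcodes (rearrangeBarcodes barcodes)


-- ===== LEMMAS AND PROOFS =====

-- the position of the k-th write of A's fill loop ((n+1)/2 even slots first, then the odd slots)
def fillPos (n k : Nat) : Nat := if 2 * k < n then 2 * k else 2 * (k - (n + 1) / 2) + 1

-- the stream of values both programs lay out: keys by decreasing count (stable), each repeated count times
def pvStream (barcodes : List Int) : List Int :=
  (PySem.List.sorted (PySem.Dict.counter barcodes).items (fun p => p.2) true).flatMap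
    (fun p => List.replicate p.2.toNat p.1)

-- B's result shape: the stream split at (n+1)/2 and zip-interleaved (odd n: one trailing even slot)
def pvInterleave (n : Nat) (s : List Int) : List Int :=
  ((s.take ((n+1)/2)).zip (s.drop ((n+1)/2))).flatMap (fun p => [p.1, p.2])
    ++ (if n % 2 = 1 then [s.getD ((n+1)/2 - 1) 0] else [])

theorem insertBy_middle (before : (Int × Int) → (Int × Int) → Bool) (x : Int × Int)
    (ys zs : List (Int × Int)) (hy : ∀ y ∈ ys, before x y = false)
    (hz : ∀ z ∈ zs, before x z = true) :
    PySem.List.insertBy before x (ys ++ zs) = ys ++ x :: zs := by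
  induction ys with
  | nil =>
    cases zs with
    | nil => simp [PySem.List.insertBy]
    | cons z zs' =>
      simp only [List.nil_append]
      rw [PySem.List.insertBy]
      simp [hz z (by simp)]
  | cons y ys' ih =>
    simp only [List.cons_append]
    rw [PySem.List.insertBy]
    rcases h : (ys' ++ zs) with _ | ⟨w, ws⟩
    · simp_all
    · simp only [hy y (by simp), Bool.false_eq_true, if_false]
      rw [← h, ih (fun y hy' => hy y (by simp [hy']))]

-- stable reverse sort by snd = buckets in decreasing key order

theorem sorted_rev_snd_eq_flatMap (l : List (Int × Int)) (cs : List Int)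
    (hcs : cs.Pairwise (fun a b => b < a)) (hmem : ∀ p ∈ l, p.2 ∈ cs) :
    PySem.List.sorted l (fun p => p.2) true
      = cs.flatMap (fun c => l.filter (fun p => p.2 == c)) := by
  induction l using List.reverseRecOn with
  | nil => simp [PySem.List.sorted]
  | append_singleton l' x ih =>
    rw [PySem.List.sorted_rev_eq_foldl_insertBy, List.foldl_append, List.foldl_cons, List.foldl_nil,
      ← PySem.List.sorted_rev_eq_foldl_insertBy,
      ih (fun p hp => hmem p (by simp [hp]))]
    -- split cs at x.2
    have hx2 : x.2 ∈ cs := hmem x (by simp)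
    obtain ⟨cs1, cs2, rfl⟩ := List.append_of_mem hx2
    have hp1 := (List.pairwise_append.mp hcs).2.2
    have hp2 := ((List.pairwise_append.mp hcs).2.1)
    rw [List.pairwise_cons] at hp2
    -- rewrite both flatMaps over the split
    simp only [List.flatMap_append, List.flatMap_cons]
    have key : PySem.List.insertBy (fun a b => decide ((b.2 : Int) < a.2)) x
        ((cs1.flatMap (fun c => l'.filter (fun p => p.2 == c))) ++
          (l'.filter (fun p => p.2 == x.2) ++ cs2.flatMap (fun c => l'.filter (fun p => p.2 == c)))) =
        (cs1.flatMap (fun c => l'.filter (fun p => p.2 == c))) ++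
          ((l'.filter (fun p => p.2 == x.2) ++ [x]) ++ cs2.flatMap (fun c => l'.filter (fun p => p.2 == c))) := by
      have := insertBy_middle (fun a b => decide ((b.2 : Int) < a.2)) x
        ((cs1.flatMap (fun c => l'.filter (fun p => p.2 == c))) ++ l'.filter (fun p => p.2 == x.2))
        (cs2.flatMap (fun c => l'.filter (fun p => p.2 == c)))
        (by
          intro y hy
          simp only [List.mem_append, List.mem_flatMap, List.mem_filter] at hy
          rcases hy with ⟨c, hc, _, hyc⟩ | ⟨_, hyc⟩
          · have : x.2 < c := hp1 c hc x.2 (by simp)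
            simp only [beq_iff_eq] at hyc
            simp [hyc]; omega
          · simp only [beq_iff_eq] at hyc
            simp [hyc])
        (by
          intro z hz
          simp only [List.mem_flatMap, List.mem_filter] at hz
          obtain ⟨c, hc, _, hzc⟩ := hz
          have : c < x.2 := hp2.1 c hc
          simp only [beq_iff_eq] at hzc
          simp [hzc]; omega)
      simpa [List.append_assoc] using this
    rw [key]
    -- now match bucket by bucket: only the x.2 bucket changes
    have h1 : ∀ c ∈ cs1, (l' ++ [x]).filter (fun p => p.2 == c) = l'.filter (fun p => p.2 == c) := by
      intro c hc
      have : x.2 < c := hp1 c hc x.2 (by simp)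
      simp [List.filter_append, show (x.2 == c) = false by simp; omega]
    have h2 : ∀ c ∈ cs2, (l' ++ [x]).filter (fun p => p.2 == c) = l'.filter (fun p => p.2 == c) := by
      intro c hc
      have : c < x.2 := hp2.1 c hc
      simp [List.filter_append, show (x.2 == c) = false by simp; omega]
    have hx : (l' ++ [x]).filter (fun p => p.2 == x.2) = l'.filter (fun p => p.2 == x.2) ++ [x] := by
      simp [List.filter_append]
    have e1 : cs1.flatMap (fun c => (l' ++ [x]).filter (fun p => p.2 == c))
        = cs1.flatMap (fun c => l'.filter (fun p => p.2 == c)) := by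
      simp only [List.flatMap]; rw [List.map_congr_left h1]
    have e2 : cs2.flatMap (fun c => (l' ++ [x]).filter (fun p => p.2 == c))
        = cs2.flatMap (fun c => l'.filter (fun p => p.2 == c)) := by
      simp only [List.flatMap]; rw [List.map_congr_left h2]
    rw [e1, e2, hx]

theorem fillPos_inj {n a b : Nat} (ha : a < n) (hb : b < n) (h : fillPos n a = fillPos n b) : a = b := by
  unfold fillPos at h; split_ifs at h <;> omega

-- the k-th fill index as computed by A's update

theorem fillPos_step {n k : Nat} (hn : 2 ≤ n) (hk : k + 1 < n) :
    (if (n : Int) ≤ (fillPos n k : Int) + 2 then 1 else (fillPos n k : Int) + 2)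
      = (fillPos n (k + 1) : Int) := by
  unfold fillPos
  split_ifs <;> push_cast <;> omega

-- A's write loop as a fold over (position, value) pairs

theorem fill_foldl_eq_zip (n : Nat) (hn : 2 ≤ n) :
    ∀ (stream : List Int) (k : Nat) (a : List Int), k + stream.length = n →
    (stream.foldl
        (fun (st : List Int × Int) x =>
          (st.1.set st.2.toNat x, if (n : Int) ≤ st.2 + 2 then 1 else st.2 + 2))
        (a, (fillPos n k : Int))).1
      = List.foldl (fun a (q : Nat × Int) => a.set q.1 q.2) a
          (((List.range stream.length).map (fun j => fillPos n (k + j))).zip stream) := by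
  intro stream
  induction stream with
  | nil => intro k a _; simp
  | cons x rest ih =>
    intro k a hk
    simp only [List.foldl_cons, List.length_cons, List.range_succ_eq_map, List.map_cons,
      List.zip_cons_cons, Nat.add_zero, Int.toNat_natCast]
    rcases rest with _ | ⟨y, rest'⟩
    · simp
    · have hk1 : k + 1 < n := by simp at hk; omega
      rw [fillPos_step hn hk1]
      rw [ih (k+1) (a.set (fillPos n k) x) (by simp at hk ⊢; omega)]
      congr 1
      simp only [List.map_map]
      congr 1
      apply List.map_congr_left
      intro j _
      simp only [Function.comp_apply, Nat.succ_eq_add_one]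
      congr 1
      omega

-- a fold of sets at positions never touching j leaves slot j alone

theorem setfold_not_mem (ps : List (Nat × Int)) (j : Nat) (hj : j ∉ ps.map (·.1)) :
    ∀ (a : List Int), (ps.foldl (fun a (q : Nat × Int) => a.set q.1 q.2) a)[j]? = a[j]? := by
  induction ps with
  | nil => intro a; rfl
  | cons p t ih =>
    intro a
    simp only [List.map_cons, List.mem_cons] at hj
    rw [List.foldl_cons, ih (fun h => hj (Or.inr h)), List.getElem?_set_ne (fun h => hj (Or.inl h.symm))]

theorem setfold_length (ps : List (Nat × Int)) :
    ∀ a : List Int, (ps.foldl (fun a (q : Nat × Int) => a.set q.1 q.2) a).length = a.length := by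
  induction ps with
  | nil => intro a; rfl
  | cons p t ih => intro a; rw [List.foldl_cons, ih]; simp

theorem setfold_mem (ps : List (Nat × Int)) (hnd : (ps.map (·.1)).Nodup) :
    ∀ (a : List Int), ∀ q ∈ ps, q.1 < a.length →
      (ps.foldl (fun a (q : Nat × Int) => a.set q.1 q.2) a)[q.1]? = some q.2 := by
  induction ps with
  | nil => intro a q hq; simp at hq
  | cons p t ih =>
    intro a q hq hlt
    simp only [List.map_cons, List.nodup_cons] at hnd
    rcases List.mem_cons.mp hq with rfl | hqt
    · rw [List.foldl_cons, setfold_not_mem t q.1 hnd.1, List.getElem?_set_self hlt]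
    · rw [List.foldl_cons]
      exact ih hnd.2 _ q hqt (by simpa using hlt)

-- interleave of a zip, element-wise

theorem zip_flatMap_pair_getElem? :
    ∀ (es os : List Int) (j : Nat), j < 2 * min es.length os.length →
      ((es.zip os).flatMap (fun p => [p.1, p.2]))[j]?
        = if j % 2 = 0 then es[j / 2]? else os[j / 2]? := by
  intro es
  induction es with
  | nil => intro os j hj; simp at hj
  | cons x es' ih =>
    intro os j hj
    cases os with
    | nil => simp at hj
    | cons y os' =>
      match j, hj with
      | 0, _ => simp
      | 1, _ => simp
      | (m+2), hj =>
        simp only [List.zip_cons_cons, List.flatMap_cons, List.cons_append, List.nil_append,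
          List.getElem?_cons_succ]
        rw [ih os' m (by simp at hj ⊢; omega)]
        have h2 : (m + 2) % 2 = m % 2 := by omega
        have h3 : (m + 2) / 2 = m / 2 + 1 := by omega
        rw [h2, h3]
        split <;> simp

theorem zip_flatMap_pair_length (es os : List Int) :
    ((es.zip os).flatMap (fun p => [p.1, p.2])).length = 2 * min es.length os.length := by
  rw [List.length_flatMap]
  induction es generalizing os with
  | nil => simp
  | cons x es' ih =>
    cases os with
    | nil => simp
    | cons y os' => simp [ih os']; omega

theorem counter_branch_eq (barcodes : List Int) :
    barcodes.foldl
        (fun d i => if d.contains i then d.insert i (d.getD i 0 + 1) else d.insert i 1)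
        PySem.Dict.empty
      = PySem.Dict.counter barcodes := by
  rw [← PySem.Dict.foldl_insert_getD_add_one_eq_counter]
  apply PySem.List.foldl_congr_mem
  intro d x _
  by_cases h : d.contains x
  · simp [h]
  · simp only [Bool.not_eq_true] at h
    simp [h, PySem.Dict.getD_of_not_contains d 0 h]

-- a fold that ignores its element, run over range(0, j), is a fold over replicate

theorem foldl_ignore_elem_eq_replicate {σ : Type} (G : σ → Int → σ) (v : Int) :
    ∀ (l : List Int) (st : σ), l.foldl (fun s (_ : Int) => G s v) st = (List.replicate l.length v).foldl G st := by
  intro l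
  induction l with
  | nil => intro st; rfl
  | cons x t ih => intro st; simp only [List.foldl_cons, List.length_cons, List.replicate_succ]; exact ih _

-- the members of Counter(xs).items have counts in [1, n]

theorem counter_items_snd_mem (barcodes : List Int) (p : Int × Int)
    (hp : p ∈ (PySem.Dict.counter barcodes).items) :
    p.2 ∈ PySem.List.pyRange (barcodes.length : Int) 0 (-1) := by
  rw [PySem.Dict.items_counter] at hp
  rw [List.mem_map] at hp
  obtain ⟨k, hk, rfl⟩ := hp
  have hk' : k ∈ barcodes := (PySem.Set.mem_ofList barcodes k).mp hk
  have h1 : 1 ≤ barcodes.count k := List.count_pos_iff.mpr hk'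
  have h2 : barcodes.count k ≤ barcodes.length := List.count_le_length
  rw [PySem.List.mem_pyRange_neg_one]
  constructor <;> simp <;> omega

theorem pyRange_countdown_pairwise (n : Int) :
    (PySem.List.pyRange n 0 (-1)).Pairwise (fun a b => b < a) := by
  rw [PySem.List.pyRange_neg_one]
  exact List.Pairwise.map _ (fun a b (hab : a < b) => by omega) List.pairwise_lt_range

-- sum of the counts of the distinct values = length

theorem sum_counts_eq_length (barcodes : List Int) :
    ((PySem.Set.ofList barcodes).map (fun k => barcodes.count k)).sum = barcodes.length := by
  have hperm : (PySem.Set.ofList barcodes).Perm barcodes.dedup := by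
    apply List.Subperm.antisymm
    · exact List.subperm_of_subset (PySem.Set.nodup_ofList barcodes)
        (fun x hx => List.mem_dedup.mpr ((PySem.Set.mem_ofList barcodes x).mp hx))
    · exact List.subperm_of_subset (List.nodup_dedup barcodes)
        (fun x hx => (PySem.Set.mem_ofList barcodes x).mpr (List.mem_dedup.mp hx))
  rw [List.Perm.sum_eq (List.Perm.map _ hperm)]
  exact List.sum_map_count_dedup_eq_length barcodes

theorem q2_items_eq (barcodes : List Int) :
    ((PySem.List.sorted (PySem.Dict.counter barcodes).items (fun p => p.2) true).foldl
        (fun (d : PySem.Dict Int Int) p => d.insert p.1 p.2) PySem.Dict.empty).items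
      = PySem.List.sorted (PySem.Dict.counter barcodes).items (fun p => p.2) true := by
  have hperm := PySem.List.sorted_perm (PySem.Dict.counter barcodes).items (fun p => (p.2 : Int)) true
  have hnd : ((PySem.List.sorted (PySem.Dict.counter barcodes).items (fun p => p.2) true).map (·.1)).Nodup := by
    refine (List.Perm.nodup_iff (List.Perm.map _ hperm)).mpr ?_
    have := PySem.Dict.nodup_keys_counter barcodes
    simpa [PySem.Dict.keys] using this
  have := PySem.Dict.items_foldl_insert_fresh
    (PySem.List.sorted (PySem.Dict.counter barcodes).items (fun p => p.2) true)
    (fun p => p.1) (fun p => p.2) PySem.Dict.empty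
    (by intro a _; simp) hnd
  simpa using this

-- A's nested write loop folds the flattened value stream

theorem A_fold_eq_stream (barcodes : List Int)
    {σ : Type} (G : σ → Int → σ) (init : σ) :
    (PySem.List.sorted (PySem.Dict.counter barcodes).items (fun p => p.2) true).foldl
        (fun st p => (PySem.List.pyRange 0 p.2 1).foldl (fun st (_ : Int) => G st p.1) st) init
      = (pvStream barcodes).foldl G init := by
  rw [pvStream, List.foldl_flatMap]
  apply PySem.List.foldl_congr_mem
  intro st p _
  rw [foldl_ignore_elem_eq_replicate G p.1, PySem.List.length_pyRange_one]
  simp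

theorem A_canon (barcodes : List Int) (h2 : 2 ≤ barcodes.length) :
    rearrangeBarcodes barcodes
      = ((pvStream barcodes).foldl
          (fun (st : List Int × Int) x =>
            (st.1.set st.2.toNat x,
              if (barcodes.length : Int) ≤ st.2 + 2 then 1 else st.2 + 2))
          (List.replicate barcodes.length 0, 0)).1 := by
  rw [rearrangeBarcodes]
  rw [if_neg (by omega)]
  simp only [counter_branch_eq, q2_items_eq]
  rw [A_fold_eq_stream barcodes
    (G := fun (st : List Int × Int) x =>
      (st.1.set st.2.toNat x, if (barcodes.length : Int) ≤ st.2 + 2 then 1 else st.2 + 2))]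

theorem flatMap_congr_mem {α β : Type} (l : List α) {f g : α → List β}
    (h : ∀ x ∈ l, f x = g x) : l.flatMap f = l.flatMap g := by
  simp only [List.flatMap]; rw [List.map_congr_left h]

theorem bucket_eq (barcodes : List Int) (c : Int) :
    (((PySem.Dict.counter barcodes).items).foldl
        (fun (d : PySem.Dict Int (List Int)) p => d.modify p.2 [] (fun l => l ++ [p.1]))
        PySem.Dict.empty).getD c []
      = (((PySem.Dict.counter barcodes).items).filter (fun p => p.2 == c)).map (·.1) := by
  rw [show (fun (d : PySem.Dict Int (List Int)) (p : Int × Int) => d.modify p.2 [] (fun l => l ++ [p.1]))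
      = (fun d p => d.modify (Prod.swap p).1 [] (fun l => l ++ [(Prod.swap p).2])) from rfl,
    ← List.foldl_map (f := Prod.swap)
      (g := fun (d : PySem.Dict Int (List Int)) (p : Int × Int) => d.modify p.1 [] (fun l => l ++ [p.2])),
    PySem.Dict.getD_foldl_modify_append, List.filter_map, List.map_map]
  simp [Function.comp_def]

-- B's flat list IS A's flattened value stream

theorem flat_eq (barcodes : List Int) :
    (PySem.List.pyRange (barcodes.length : Int) 0 (-1)).foldl
        (fun acc c =>
          ((((PySem.Dict.counter barcodes).items).foldl
              (fun (d : PySem.Dict Int (List Int)) p => d.modify p.2 [] (fun l => l ++ [p.1]))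
              PySem.Dict.empty).getD c []).foldl
            (fun acc x => acc ++ PySem.List.pyRepeat [x] c) acc)
        []
      = pvStream barcodes := by
  have step : ∀ (acc : List Int) (c : Int), c ∈ PySem.List.pyRange (barcodes.length : Int) 0 (-1) →
      ((((PySem.Dict.counter barcodes).items).foldl
          (fun (d : PySem.Dict Int (List Int)) p => d.modify p.2 [] (fun l => l ++ [p.1]))
          PySem.Dict.empty).getD c []).foldl
        (fun acc x => acc ++ PySem.List.pyRepeat [x] c) acc
      = acc ++ ((PySem.Dict.counter barcodes).items.filter (fun p => p.2 == c)).flatMap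
          (fun p => List.replicate c.toNat p.1) := by
    intro acc c _
    rw [bucket_eq]
    have : (fun (acc : List Int) (x : Int) => acc ++ PySem.List.pyRepeat [x] c)
        = fun acc x => acc ++ List.replicate c.toNat x := by
      funext acc x; rw [PySem.List.pyRepeat_singleton]
    rw [this, PySem.List.foldl_append_eq_flatMap, List.flatMap_map]
  have h1 := PySem.List.foldl_congr_mem
    (PySem.List.pyRange (barcodes.length : Int) 0 (-1)) _
    (fun acc c => acc ++
      ((PySem.Dict.counter barcodes).items.filter (fun p => p.2 == c)).flatMap
        (fun p => List.replicate c.toNat p.1)) [] step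
  rw [h1, PySem.List.foldl_append_eq_flatMap]
  rw [pvStream,
    sorted_rev_snd_eq_flatMap _ _ (pyRange_countdown_pairwise _) (counter_items_snd_mem barcodes),
    List.flatMap_assoc, List.nil_append]
  apply flatMap_congr_mem
  intro c _
  apply flatMap_congr_mem
  intro p hp
  have : p.2 = c := by simpa using (List.mem_filter.mp hp).2
  rw [this]

theorem B_canon (barcodes : List Int) (h2 : 2 ≤ barcodes.length) :
    rearrangeBarcodes_alt barcodes = pvInterleave barcodes.length (pvStream barcodes) := by
  rw [rearrangeBarcodes_alt, if_neg (by omega)]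
  simp only [PySem.Dict.foldl_insert_getD_add_one_eq_counter]
  rw [flat_eq]
  have hhalf : PySem.Int.floordiv ((barcodes.length : Int) + 1) 2
      = (((barcodes.length + 1) / 2 : Nat) : Int) := by
    have := PySem.Int.floordiv_natCast (barcodes.length + 1) 2
    push_cast at this ⊢
    exact this
  rw [hhalf, PySem.List.slice_to _ (by positivity), PySem.List.slice_from _ (by positivity)]
  simp only [Int.toNat_natCast]
  have hout : ((pvStream barcodes).take ((barcodes.length + 1) / 2) |>.zip
        ((pvStream barcodes).drop ((barcodes.length + 1) / 2))).foldl
        (fun acc p => (acc ++ [p.1]) ++ [p.2]) []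
      = ((pvStream barcodes).take ((barcodes.length + 1) / 2) |>.zip
        ((pvStream barcodes).drop ((barcodes.length + 1) / 2))).flatMap (fun p => [p.1, p.2]) := by
    have h1 := PySem.List.foldl_congr_mem
      ((pvStream barcodes).take ((barcodes.length + 1) / 2) |>.zip
        ((pvStream barcodes).drop ((barcodes.length + 1) / 2)))
      (fun acc p => (acc ++ [p.1]) ++ [p.2])
      (fun acc p => acc ++ [p.1, p.2]) []
      (by intro acc p _; simp)
    rw [h1, PySem.List.foldl_append_eq_flatMap (g := fun p : Int × Int => [p.1, p.2]), List.nil_append]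
  rw [hout]
  have hmod : PySem.Int.mod (barcodes.length : Int) 2 = ((barcodes.length % 2 : Nat) : Int) := by
    exact_mod_cast PySem.Int.mod_natCast barcodes.length 2
  have hget : PySem.List.pyGetD (pvStream barcodes) ((((barcodes.length + 1) / 2 : Nat) : Int) - 1) 0
      = (pvStream barcodes).getD ((barcodes.length + 1) / 2 - 1) 0 := by
    rw [show ((((barcodes.length + 1) / 2 : Nat) : Int) - 1) = (((barcodes.length + 1) / 2 - 1 : Nat) : Int) by
      push_cast [Nat.cast_sub (by omega : 1 ≤ (barcodes.length + 1) / 2)]; ring]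
    exact PySem.List.pyGetD_natCast _ _ _
  rw [hmod, hget, pvInterleave]
  by_cases hpar : barcodes.length % 2 = 0
  · simp [hpar]
  · have : barcodes.length % 2 = 1 := by omega
    simp [this]

theorem canon_eq (n : Nat) (hn : 2 ≤ n) (s : List Int) (hs : s.length = n) :
    (s.foldl
        (fun (st : List Int × Int) x =>
          (st.1.set st.2.toNat x, if (n : Int) ≤ st.2 + 2 then 1 else st.2 + 2))
        (List.replicate n 0, 0)).1
      = pvInterleave n s := by
  have h0 : ((0 : Int)) = ((fillPos n 0 : Nat) : Int) := by unfold fillPos; split <;> omega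
  rw [show ((List.replicate n (0:Int), (0:Int))) = (List.replicate n (0:Int), ((fillPos n 0 : Nat) : Int)) by rw [← h0],
    fill_foldl_eq_zip n hn s 0 (List.replicate n 0) (by omega)]
  simp only [Nat.zero_add]
  rw [pvInterleave]
  set h : Nat := (n + 1) / 2 with hh
  set zips : List (Nat × Int) := ((List.range s.length).map (fun j => fillPos n j)).zip s with hzips
  have hlenz : zips.length = n := by simp [hzips, hs]
  have hndz : (zips.map (·.1)).Nodup := by
    have hfst : zips.map (·.1) = (List.range s.length).map (fun j => fillPos n j) := by
      apply List.map_fst_zip; simp [hs]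
    rw [hfst]
    exact List.Nodup.map_on
      (fun a ha b hb hab => fillPos_inj (by simpa [hs] using List.mem_range.mp ha)
        (by simpa [hs] using List.mem_range.mp hb) hab)
      (List.nodup_range)
  -- element-wise
  apply List.ext_getElem?
  intro i
  have hlenA : (zips.foldl (fun a (q : Nat × Int) => a.set q.1 q.2) (List.replicate n (0:Int))).length = n := by
    rw [setfold_length]; simp
  have hmin : min ((s.take h).length) ((s.drop h).length) = n - h := by
    simp [hs]; omega
  have hlenB : (((s.take h).zip (s.drop h)).flatMap (fun p => [p.1, p.2])
      ++ (if n % 2 = 1 then [s.getD (h - 1) 0] else [])).length = n := by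
    rw [List.length_append, zip_flatMap_pair_length, hmin]
    rcases Nat.even_or_odd n with he | ho
    · have : n % 2 = 0 := Nat.even_iff.mp he
      simp [this]; omega
    · have h1 : n % 2 = 1 := Nat.odd_iff.mp ho
      simp [h1]; omega
  by_cases hi : i < n
  · -- the k-th write lands at slot i, k = kInv
    set k : Nat := if i % 2 = 0 then i / 2 else h + i / 2 with hk
    have hkn : k < n := by rw [hk]; split <;> omega
    have hpos : fillPos n k = i := by rw [hk]; unfold fillPos; split_ifs <;> omega
    have hzk : zips[k]? = some (fillPos n k, s[k]'(by omega)) := by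
      rw [List.getElem?_eq_getElem (by omega), List.getElem_zip]
      congr 1
      simp [hs]
    have hmem : (fillPos n k, s[k]'(by omega)) ∈ zips := List.mem_of_getElem? hzk
    have hA : (zips.foldl (fun a (q : Nat × Int) => a.set q.1 q.2) (List.replicate n (0:Int)))[i]?
        = some (s[k]'(by omega)) := by
      have := setfold_mem zips hndz (List.replicate n (0:Int)) (fillPos n k, s[k]'(by omega)) hmem
        (by simp [hpos]; omega)
      simpa [hpos] using this
    rw [hA]
    by_cases hsmall : i < 2 * (n - h)
    · rw [List.getElem?_append_left (by rw [zip_flatMap_pair_length, hmin]; omega),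
        zip_flatMap_pair_getElem? _ _ i (by rw [hmin]; omega)]
      by_cases hpar : i % 2 = 0
      · rw [if_pos hpar, List.getElem?_take, if_pos (by omega), List.getElem?_eq_getElem (by omega)]
        have : k = i / 2 := by rw [hk, if_pos hpar]
        simp [this]
      · rw [if_neg hpar, List.getElem?_drop, List.getElem?_eq_getElem (by omega)]
        have : k = h + i / 2 := by rw [hk, if_neg hpar]
        simp [this]
    · -- only in the odd case: the appended last element
      have hodd : n % 2 = 1 := by omega
      have hi' : i = n - 1 := by omega
      have hieven : i % 2 = 0 := by omega
      rw [List.getElem?_append_right (by rw [zip_flatMap_pair_length, hmin]; omega)]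
      rw [zip_flatMap_pair_length, hmin, if_pos hodd]
      have : i - 2 * (n - h) = 0 := by omega
      rw [this]
      simp only [List.getElem?_cons_zero]
      have hkval : k = h - 1 := by rw [hk, if_pos hieven]; omega
      rw [List.getD_eq_getElem s 0 (by omega)]
      simp [hkval]
  · rw [List.getElem?_eq_none (by omega), List.getElem?_eq_none (by omega)]

theorem stream_length (barcodes : List Int) :
    (pvStream barcodes).length = barcodes.length := by
  rw [pvStream, List.length_flatMap]
  have hperm := PySem.List.sorted_perm (PySem.Dict.counter barcodes).items (fun p => (p.2 : Int)) true
  rw [List.Perm.sum_eq (List.Perm.map _ hperm), PySem.Dict.items_counter, List.map_map]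
  have : ((fun (p : Int × Int) => (List.replicate p.2.toNat p.1).length) ∘
      fun k => (k, (barcodes.count k : Int))) = fun k => barcodes.count k := by
    funext k; simp
  rw [this]
  exact sum_counts_eq_length barcodes

-- ===== VERDICT (by name: the statement is the Claim_ definition above) =====
theorem rearrangeBarcodes_spec : Claim_equal_rearrangeBarcodes := by
  intro barcodes _
  unfold Spec_rearrangeBarcodes
  by_cases hlt : barcodes.length < 2
  · rw [rearrangeBarcodes, rearrangeBarcodes_alt, if_pos hlt, if_pos hlt]
  · have h2 : 2 ≤ barcodes.length := by omega
    rw [A_canon barcodes h2, B_canon barcodes h2]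
    exact canon_eq barcodes.length h2 (pvStream barcodes) (stream_length barcodes)
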